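-- pv_equiv track=rewrite | github.com/Hidden-History/bmad-qdrant-knowledge-management | validation/test_monthly_review.py | identify_coverage_gaps
-- ===== SOURCE A (Python) =====
-- def identify_coverage_gaps(entries, expected):
--     """Identify what's missing from knowledge base."""
--     gaps = []
--     covered = []
--
--     # Check if entries cover expected areas
--     for area in expected:
--         # Simple keyword matching (real implementation would use semantic search)
--         area_covered = any(
--             area.replace("_", " ") in str(e).lower()
--             or area in e.get("unique_id", "").lower()
--             for e in entries
--         )
--
--         if area_covered:
--             covered.append(area)
--         else:
--             gaps.append(area)
--
--     return {"gaps": gaps, "covered": covered}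
-- ===== SOURCE B (Python) =====
-- def identify_coverage_gaps(entries, expected):
--     """Identify what's missing from knowledge base."""
--     if not entries:
--         return {"gaps": list(expected), "covered": []}
--     sep = "\x00"
--     text_corpus = sep.join(str(e).lower() for e in entries)
--     uid_corpus = sep.join(e.get("unique_id", "").lower() for e in entries)
--
--     def hit(area):
--         return area.replace("_", " ") in text_corpus or area in uid_corpus
--
--     covered = [a for a in expected if hit(a)]
--     gaps = [a for a in expected if not hit(a)]
--     return {"gaps": gaps, "covered": covered}
-- ===== Notes on version B (the rewrite author's own statement) =====
-- stated objective: alternative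
-- what changed: B builds a one-time corpus index: all lowered entry texts (and all lowered unique_ids) are joined into single strings with a '\x00' separator that cannot occur in any input string, so each area is decided by two substring searches on the corpora (outputs assembled by two comprehensions over expected), instead of A's per-area any() scan that re-renders and re-lowers every entry; empty entries short-circuits to all-gaps.
import Mathlib
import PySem

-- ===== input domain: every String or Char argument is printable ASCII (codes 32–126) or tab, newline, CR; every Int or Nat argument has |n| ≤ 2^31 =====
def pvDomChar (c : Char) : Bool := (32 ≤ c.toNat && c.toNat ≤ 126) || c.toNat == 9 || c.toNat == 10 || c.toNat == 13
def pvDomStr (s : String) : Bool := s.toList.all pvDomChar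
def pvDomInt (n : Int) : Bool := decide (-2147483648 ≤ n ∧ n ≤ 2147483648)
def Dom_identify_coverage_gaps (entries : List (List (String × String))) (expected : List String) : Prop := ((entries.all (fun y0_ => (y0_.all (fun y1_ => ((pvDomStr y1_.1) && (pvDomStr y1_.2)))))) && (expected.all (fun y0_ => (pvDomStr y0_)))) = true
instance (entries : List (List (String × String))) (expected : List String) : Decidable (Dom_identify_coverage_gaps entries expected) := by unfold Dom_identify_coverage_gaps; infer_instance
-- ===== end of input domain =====

-- B replaces A's per-area scan over all entries by a corpus index built once: all lowered entry
-- texts (and uids) are joined by '\x00' — absent from any Dom string — and each area becomes two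
-- substring searches on the corpora; objective: alternative (index built once vs per-area rescans).

-- ===== PORT A =====
-- shared primitive ports of Python's str(dict-of-str) on the stated ASCII domain (both Pythons call str(e)):
-- repr(s) for a str s: quote choice and \\ \t \n \r escapes, exact for printable ASCII + tab/newline/CR
def pvStrRepr (s : List Char) : List Char :=
  let q : Char := if s.contains '\'' && !(s.contains '"') then '"' else '\''
  q :: (s.flatMap (fun c =>
    if c == '\\' then ['\\', '\\']
    else if c == q then ['\\', q]
    else if c == '\t' then ['\\', 't']
    else if c == '\n' then ['\\', 'n']
    else if c == '\r' then ['\\', 'r']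
    else [c])) ++ [q]

-- str(e) for a dict e : "{'k': 'v', …}" in insertion order
def pvDictStr (d : PySem.Dict String String) : List Char :=
  '{' :: List.intercalate (", ".toList) (d.items.map (fun p => pvStrRepr p.1.toList ++ ':' :: ' ' :: pvStrRepr p.2.toList)) ++ ['}']

-- A's per-(area, entry) condition: area.replace("_"," ") in str(e).lower() or area in e.get("unique_id","").lower()
def pvMatch (e : List (String × String)) (area : String) : Bool :=
  let d := PySem.Dict.ofList e
  PySem.Chars.isIn (PySem.Chars.replace area.toList ['_'] [' ']) (PySem.Chars.lower (pvDictStr d))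
    || PySem.Chars.isIn area.toList (PySem.Chars.lower (d.getD "unique_id" "").toList)

def identify_coverage_gaps (entries : List (List (String × String))) (expected : List String) : List (String × List String) :=
  let r := expected.foldl (fun (acc : List String × List String) area =>
    let area_covered := entries.any (fun e => pvMatch e area)
    if area_covered then (acc.1, acc.2 ++ [area]) else (acc.1 ++ [area], acc.2)) ([], [])
  [("gaps", r.1), ("covered", r.2)]

-- ===== PORT B =====
-- Source B: early return on empty entries; otherwise two '\x00'-joined corpora built once,
-- then one loop over expected doing two substring tests against the corpora.
def identify_coverage_gaps_alt (entries : List (List (String × String))) (expected : List String) : List (String × List String) :=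
  if entries = [] then [("gaps", expected), ("covered", [])]
  else
    let sep : Char := Char.ofNat 0
    let text_corpus := PySem.Chars.join [sep]
      (entries.map (fun e => PySem.Chars.lower (pvDictStr (PySem.Dict.ofList e))))
    let uid_corpus := PySem.Chars.join [sep]
      (entries.map (fun e => PySem.Chars.lower ((PySem.Dict.ofList e).getD "unique_id" "").toList))
    let hit := fun (area : String) =>
      PySem.Chars.isIn (PySem.Chars.replace area.toList ['_'] [' ']) text_corpus
        || PySem.Chars.isIn area.toList uid_corpus
    let covered := expected.filter (fun a => hit a)
    let gaps := expected.filter (fun a => !hit a)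
    [("gaps", gaps), ("covered", covered)]

-- ===== PRECONDITION & SPEC =====
def Spec_identify_coverage_gaps (entries : List (List (String × String))) (expected : List String) (out : List (String × List String)) : Prop := out = identify_coverage_gaps_alt entries expected
instance (entries : List (List (String × String))) (expected : List String) (out : List (String × List String)) : Decidable (Spec_identify_coverage_gaps entries expected out) := by unfold Spec_identify_coverage_gaps; infer_instance

-- ===== CLAIM =====
def Claim_equal_identify_coverage_gaps : Prop := ∀ (entries : List (List (String × String))) (expected : List String), Dom_identify_coverage_gaps entries expected → Spec_identify_coverage_gaps entries expected (identify_coverage_gaps entries expected)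

-- ===== LEMMAS AND PROOFS =====

-- suffix analogue of List.isPrefix_append_of_length
theorem pv_suffix_of_append (u v w : List Char) (h : u <:+ v ++ w) (hl : u.length ≤ w.length) :
    u <:+ w := by
  rw [← List.reverse_prefix] at h ⊢
  rw [List.reverse_append] at h
  exact (List.isPrefix_append_of_length (by simpa using hl)).mp h

-- an occurrence of pat in a ++ sep :: b with sep ∉ pat lies wholly in a or wholly in b
theorem pv_infix_sep_split (pat a b : List Char) (sep : Char) (hsep : sep ∉ pat) :
    pat <:+: a ++ sep :: b ↔ pat <:+: a ∨ pat <:+: b := by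
  constructor
  · rintro ⟨s, t, h⟩
    by_cases h1 : s.length + pat.length ≤ a.length
    · left
      have hp : s ++ pat <+: a ++ sep :: b := ⟨t, by simpa [List.append_assoc] using h⟩
      have hpa : s ++ pat <+: a := (List.isPrefix_append_of_length (by simpa using h1)).mp hp
      exact List.IsInfix.trans ⟨s, [], by simp⟩ hpa.isInfix
    · by_cases h2 : a.length + 1 ≤ s.length
      · right
        have hlen : pat.length + t.length ≤ b.length := by
          have := congrArg List.length h
          simp at this; omega
        have hs : pat ++ t <:+ (a ++ [sep]) ++ b := by
          refine ⟨s, ?_⟩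
          simpa [List.append_assoc] using h
        have hsb : pat ++ t <:+ b := pv_suffix_of_append _ _ _ hs (by simpa using hlen)
        exact List.IsInfix.trans ⟨[], t, by simp⟩ hsb.isInfix
      · exfalso
        have hsl : s.length ≤ a.length := by omega
        have hge : (a ++ sep :: b)[a.length]? = some sep := by
          simp
        rw [← h] at hge
        rw [List.append_assoc] at hge
        rw [List.getElem?_append_right hsl] at hge
        rw [List.getElem?_append_left (by omega)] at hge
        exact hsep (List.mem_of_getElem? hge)
  · rintro (h | h)
    · exact List.IsInfix.trans h ⟨[], sep :: b, by simp⟩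
    · exact List.IsInfix.trans h ⟨a ++ [sep], [], by simp⟩

-- substring of the sep-joined corpus = substring of some segment (sep not in the pattern)
theorem pv_isIn_join (pat : List Char) (sep : Char) (ts : List (List Char))
    (hne : ts ≠ []) (hsep : sep ∉ pat) :
    PySem.Chars.isIn pat (PySem.Chars.join [sep] ts) = ts.any (fun t => PySem.Chars.isIn pat t) := by
  induction ts with
  | nil => exact absurd rfl hne
  | cons t rest ih =>
    cases rest with
    | nil => simp [PySem.Chars.join_singleton]
    | cons u rs =>
      rw [PySem.Chars.join_cons_cons]
      rw [Bool.eq_iff_iff]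
      simp only [List.any_cons, Bool.or_eq_true, PySem.Chars.isIn_iff_infix]
      rw [show t ++ [sep] ++ PySem.Chars.join [sep] (u :: rs)
            = t ++ sep :: PySem.Chars.join [sep] (u :: rs) by simp]
      rw [pv_infix_sep_split _ _ _ _ hsep]
      have := ih (by simp)
      rw [Bool.eq_iff_iff] at this
      simp only [PySem.Chars.isIn_iff_infix, List.any_cons, Bool.or_eq_true] at this
      rw [this]

-- every char of replace s old new comes from s or from new
theorem pv_mem_replace_go (old new : List Char) (fuel : Nat) (l acc : List Char) (c : Char)
    (h : c ∈ PySem.Chars.replace.go old new fuel l acc) : c ∈ l ∨ c ∈ acc ∨ c ∈ new := by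
  induction fuel generalizing l acc with
  | zero =>
    simp only [PySem.Chars.replace.go] at h
    rcases List.mem_append.mp h with h | h
    · exact Or.inr (Or.inl (List.mem_reverse.mp h))
    · exact Or.inl h
  | succ fuel ih =>
    cases l with
    | nil =>
      simp only [PySem.Chars.replace.go] at h
      exact Or.inr (Or.inl (List.mem_reverse.mp h))
    | cons x t =>
      simp only [PySem.Chars.replace.go] at h
      split at h
      · rcases ih _ _ h with h | h | h
        · exact Or.inl (List.mem_of_mem_drop h)
        · rcases List.mem_append.mp h with h | h
          · exact Or.inr (Or.inr (List.mem_reverse.mp h))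
          · exact Or.inr (Or.inl h)
        · exact Or.inr (Or.inr h)
      · rcases ih _ _ h with h | h | h
        · exact Or.inl (List.mem_cons_of_mem _ h)
        · rcases List.mem_cons.mp h with rfl | h
          · exact Or.inl (List.mem_cons_self)
          · exact Or.inr (Or.inl h)
        · exact Or.inr (Or.inr h)

theorem pv_mem_replace (s old new : List Char) (c : Char)
    (h : c ∈ PySem.Chars.replace s old new) : c ∈ s ∨ c ∈ new := by
  unfold PySem.Chars.replace at h
  split at h
  · rcases List.mem_append.mp h with h | h
    · exact Or.inr h
    · rcases List.mem_flatMap.mp h with ⟨x, hx, hm⟩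
      rcases List.mem_cons.mp hm with rfl | hm
      · exact Or.inl hx
      · exact Or.inr hm
  · rcases pv_mem_replace_go _ _ _ _ _ _ h with h | h | h
    · exact Or.inl h
    · exact absurd h (List.not_mem_nil)
    · exact Or.inr h

-- any distributes over || (over the same list)
theorem pv_any_or {α : Type} (l : List α) (p q : α → Bool) :
    (l.any fun x => p x || q x) = (l.any p || l.any q) := by
  induction l with
  | nil => rfl
  | cons x xs ih =>
    simp only [List.any_cons, ih]
    cases p x <;> cases q x <;> simp

-- A's accumulator loop with predicate f
theorem pv_pair_fold (f : String → Bool) (xs : List String) (g c : List String) :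
    xs.foldl (fun (acc : List String × List String) a =>
        if f a then (acc.1, acc.2 ++ [a]) else (acc.1 ++ [a], acc.2)) (g, c)
      = (g ++ xs.filter (fun a => !f a), c ++ xs.filter f) := by
  induction xs generalizing g c with
  | nil => simp
  | cons x xs ih =>
    by_cases hx : f x = true <;> simp [hx, ih]

-- a Dom string does not contain the NUL separator
theorem pv_nul_not_mem (s : String) (hs : pvDomStr s = true) : Char.ofNat 0 ∉ s.toList := by
  intro hmem
  have := List.all_eq_true.mp hs _ hmem
  simp [pvDomChar] at this

-- ===== VERDICT =====
theorem identify_coverage_gaps_spec : Claim_equal_identify_coverage_gaps := by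
  intro entries expected hdom
  unfold Spec_identify_coverage_gaps identify_coverage_gaps identify_coverage_gaps_alt
  by_cases hne : entries = []
  · subst hne
    simp only
    rw [pv_pair_fold]
    simp
  · rw [if_neg hne]
    simp only
    rw [pv_pair_fold]
    have hdome : expected.all (fun s => pvDomStr s) = true := by
      unfold Dom_identify_coverage_gaps at hdom
      rw [Bool.and_eq_true] at hdom
      exact hdom.2
    have hpt : ∀ a ∈ expected,
        (entries.any fun e => pvMatch e a)
          = (PySem.Chars.isIn (PySem.Chars.replace a.toList ['_'] [' '])
              (PySem.Chars.join [Char.ofNat 0]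
                (entries.map (fun e => PySem.Chars.lower (pvDictStr (PySem.Dict.ofList e))))) ||
             PySem.Chars.isIn a.toList
              (PySem.Chars.join [Char.ofNat 0]
                (entries.map (fun e => PySem.Chars.lower ((PySem.Dict.ofList e).getD "unique_id" "").toList)))) := by
      intro area ha
      have harea : pvDomStr area = true := List.all_eq_true.mp hdome _ ha
      have hnul : Char.ofNat 0 ∉ area.toList := pv_nul_not_mem _ harea
      have hnulpat : Char.ofNat 0 ∉ PySem.Chars.replace area.toList ['_'] [' '] := by
        intro hmem
        rcases pv_mem_replace _ _ _ _ hmem with h | h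
        · exact hnul h
        · exact absurd (List.mem_singleton.mp h) (by decide)
      rw [pv_isIn_join _ _ _ (by simpa using hne) hnulpat,
          pv_isIn_join _ _ _ (by simpa using hne) hnul,
          List.any_map, List.any_map]
      rw [← pv_any_or]
      rfl
    simp only [List.nil_append, List.cons.injEq, Prod.mk.injEq, true_and, and_true]
    exact ⟨List.filter_congr (fun a ha => by rw [hpt a ha]),
           List.filter_congr (fun a ha => by rw [hpt a ha])⟩
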